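-- pv_equiv track=rewrite | github.com/Ccruch/SDUcst | SM3/sm3.py | z_h
-- ===== SOURCE A (Python) =====
-- def z_h(text):
--     ''' 进制转换'''
--     text = str(text)
--     while len(text) < 32:
--         text = '0' + text
--     text_16=''
--     for i in range(8):
--         tmp = hex(int(text[4 * i:4 * (i + 1)], base = 2))[2:]
--         text_16 += tmp
--     return text_16
-- ===== SOURCE B (Python) =====
-- def z_h(text):
--     bits = str(text)[:32].rstrip()
--     n = 0
--     for b in bits:
--         n = 2 * n + int(b)
--     return format(n, '08x')
-- ===== Notes on version B (the rewrite author's own statement) =====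
-- stated objective: simpler
-- what changed: The 8-iteration loop of slice / int(group,2) / hex()[2:] string concatenation over a while-loop-padded string is replaced by truncate-and-rstrip, one Horner pass accumulating the whole value, and a single format(n,'08x') call (no padding needed: leading zeros do not change the value).
-- intended difference: On inputs whose first 32 characters end in 1-3 whitespace characters and whose digit string has a '1' above the shortened last 4-char group, A returns a misweighted value because the last group's missing low bits are silently skipped (A('10001 ') = '00000021'), while B returns the hex value of the binary digits themselves ('00000011'), the intended base conversion. — e.g. on z_h("10001 "): A returns "00000021", B returns "00000011"
-- outside the precondition, e.g. on z_h('-11100000000000000000000000000000'): A returns 'x70000000', B raises ValueError; on z_h('101 0000000000000000000000000000'): A returns '50000000', B raises ValueError; on z_h('1_110000000000000000000000000000'): A returns '70000000', B raises ValueError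
import Mathlib
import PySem

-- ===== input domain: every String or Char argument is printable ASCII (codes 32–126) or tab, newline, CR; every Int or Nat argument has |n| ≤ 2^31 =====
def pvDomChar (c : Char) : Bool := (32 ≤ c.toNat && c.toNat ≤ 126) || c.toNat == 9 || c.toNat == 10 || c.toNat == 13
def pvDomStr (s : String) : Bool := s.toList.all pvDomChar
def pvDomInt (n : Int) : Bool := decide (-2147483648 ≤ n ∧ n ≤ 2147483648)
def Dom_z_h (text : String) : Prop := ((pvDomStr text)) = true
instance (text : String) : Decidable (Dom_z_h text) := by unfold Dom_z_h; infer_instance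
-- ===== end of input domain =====

-- B replaces the 8-iteration slice/int/hex nibble loop by one Horner pass over the (truncated,
-- whitespace-stripped) digit string followed by a single 8-digit zero-padded hex format
-- (objective: simpler); on trailing-whitespace inputs where A misweights the digits, B returns
-- the intended value (see D_z_h below).

-- hex digit character for a value 0..15
def hexDigit (n : Nat) : Char :=
  (['0','1','2','3','4','5','6','7','8','9','a','b','c','d','e','f']).getD n '0'

-- hex(n)[2:] / the digits of format(n,'x'): msb-first hex digits of a nonnegative value,
-- exact for 0 ≤ n, which Pre_z_h guarantees at every use. Structural recursion on a fuel
-- that is provably sufficient (n/16 < n), so the kernel can evaluate it.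
def hexNatGo : Nat → Nat → List Char
  | 0, n => [hexDigit (n % 16)]
  | fuel + 1, n => if n < 16 then [hexDigit n] else hexNatGo fuel (n / 16) ++ [hexDigit (n % 16)]

def hexNat (n : Nat) : List Char := hexNatGo n n

-- ===== PORT A =====
-- the 'while len(text) < 32: text = '0' + text' loop; fuel 32 covers every iteration count
def pad32go : Nat → List Char → List Char
  | 0, l => l
  | fuel + 1, l => if l.length < 32 then pad32go fuel ('0' :: l) else l

def pad32 (l : List Char) : List Char := pad32go 32 l

-- hex(int(text[4*i:4*(i+1)], base=2))[2:]: int → PySem.Int.ofCharsBase?; Python raises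
-- where it is none (excluded by Pre_z_h); hex(·)[2:] via hexNat, exact for the nonnegative
-- values Pre_z_h guarantees.
def z_h (text : String) : String :=
  let t := pad32 text.toList
  String.ofList ((List.range 8).foldl
    (fun acc i =>
      acc ++ hexNat ((PySem.Int.ofCharsBase? (PySem.List.slice t (some ((4 * i : Nat) : Int)) (some ((4 * (i + 1) : Nat) : Int))) 2).getD 0).toNat)
    [])

-- ===== PORT B =====
-- format(n, '08x') for 0 ≤ n (the only values reached: n accumulates digits 0/1 under Pre_z_h)
def fmt08x (n : Int) : List Char :=
  let d := hexNat n.toNat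
  List.replicate (8 - d.length) '0' ++ d

-- Source B: bits = str(text)[:32].rstrip(); Horner loop n = 2*n + int(b); format(n,'08x').
-- int(b) → PySem.Int.ofChars? [b]; Python raises where it is none (excluded by Pre_z_h).
def z_h_alt (text : String) : String :=
  let bits := PySem.Chars.rstrip (PySem.List.slice text.toList none (some (32 : Int)))
  let n := bits.foldl (fun n b => 2 * n + (PySem.Int.ofChars? [b]).getD 0) (0 : Int)
  String.ofList (fmt08x n)

-- ===== PRECONDITION & SPEC =====
-- Pre_z_h: after truncating to the first 32 characters and stripping trailing whitespace, only
-- '0'/'1' digits remain, and at most 3 whitespace characters were stripped (so A's last 4-char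
-- group still parses). Outside it A either raises ValueError (some 4-char group fails int(·,2)),
-- or — when a group parses only thanks to int's acceptance of signs, inner/leading whitespace or
-- underscores — returns a groupwise-parsing artefact (e.g. hex of a negative group yields an
-- 'x…' digit), while B's per-character int(b) raises on every such sign/space/underscore character.
def Pre_z_h (text : String) : Prop :=
  (PySem.Chars.rstrip (text.toList.take 32)).all (fun c => c == '0' || c == '1') = true ∧
  (text.toList.take 32).length - (PySem.Chars.rstrip (text.toList.take 32)).length ≤ 3
instance (text : String) : Decidable (Pre_z_h text) := by unfold Pre_z_h; infer_instance

def pvWitness_z_h : String := "1011"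

-- On inputs whose first-32 characters end in 1–3 whitespace characters and whose digit string
-- has a '1' above the final shortened group, A returns a misweighted value (the final group's
-- missing low digits are silently skipped, e.g. A('10001 ') = '00000021'), while B returns the
-- hex value of the binary digits themselves ('00000011'), which is the intended base conversion.
def D_z_h (text : String) : Prop :=
  1 ≤ (text.toList.take 32).length - (PySem.Chars.rstrip (text.toList.take 32)).length ∧
  '1' ∈ (PySem.Chars.rstrip (text.toList.take 32)).take
      ((PySem.Chars.rstrip (text.toList.take 32)).length -
        (4 - ((text.toList.take 32).length - (PySem.Chars.rstrip (text.toList.take 32)).length)))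
instance (text : String) : Decidable (D_z_h text) := by unfold D_z_h; infer_instance

def Spec_z_h (text : String) (out : String) : Prop := ¬ D_z_h text → out = z_h_alt text
instance (text : String) (out : String) : Decidable (Spec_z_h text out) := by unfold Spec_z_h; infer_instance

def pvDiffWitness_z_h : String := "10001 "
def pvDiffWitnessOut_z_h : String × String := ("00000021", "00000011")

-- ===== CLAIM (what is proved, stated in full; the proofs are below) =====
def Claim_unchanged_z_h : Prop := ∀ (text : String), Dom_z_h text → Pre_z_h text → Spec_z_h text (z_h text)
def Claim_changed_z_h : Prop := Dom_z_h (pvDiffWitness_z_h) ∧ Pre_z_h (pvDiffWitness_z_h) ∧ D_z_h (pvDiffWitness_z_h) ∧ z_h (pvDiffWitness_z_h) = pvDiffWitnessOut_z_h.1 ∧ z_h_alt (pvDiffWitness_z_h) = pvDiffWitnessOut_z_h.2 ∧ pvDiffWitnessOut_z_h.1 ≠ pvDiffWitnessOut_z_h.2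
def Claim_exact_z_h : Prop := ∀ (text : String), Dom_z_h text → Pre_z_h text → D_z_h text → z_h text ≠ z_h_alt text

-- ===== LEMMAS AND PROOFS =====

-- value of a binary digit string, msb first
def bv (cs : List Char) : Nat :=
  cs.foldl (fun a c => 2 * a + (if c = '1' then 1 else 0)) 0

def binOK (cs : List Char) : Prop := ∀ c ∈ cs, c = '0' ∨ c = '1'

lemma bv_foldl (cs : List Char) : ∀ a : Nat,
    cs.foldl (fun a c => 2 * a + (if c = '1' then 1 else 0)) a = a * 2 ^ cs.length + bv cs := by
  induction cs with
  | nil => intro a; show a = a * 2 ^ ([] : List Char).length + 0; simp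
  | cons c cs ih =>
      intro a
      have hb : bv (c :: cs) = (2 * 0 + if c = '1' then 1 else 0) * 2 ^ cs.length + bv cs := by
        show List.foldl _ _ (c :: cs) = _
        rw [List.foldl_cons, ih]
      rw [List.foldl_cons, ih, hb, List.length_cons]
      ring

lemma bv_cons (c : Char) (cs : List Char) :
    bv (c :: cs) = (if c = '1' then 1 else 0) * 2 ^ cs.length + bv cs := by
  show List.foldl _ _ (c :: cs) = _
  rw [List.foldl_cons, bv_foldl]
  ring

lemma bv_append (xs ys : List Char) : bv (xs ++ ys) = bv xs * 2 ^ ys.length + bv ys := by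
  show List.foldl _ _ (xs ++ ys) = _
  rw [List.foldl_append, bv_foldl]
  rfl

lemma bv_lt (cs : List Char) : bv cs < 2 ^ cs.length := by
  induction cs with
  | nil => simp [bv]
  | cons c cs ih =>
      rw [bv_cons]
      have : (if c = '1' then 1 else 0) ≤ 1 := by split_ifs <;> omega
      simp only [List.length_cons, pow_succ]
      nlinarith [ih]

lemma bv_zeros (cs : List Char) (h : ∀ c ∈ cs, c = '0') : bv cs = 0 := by
  induction cs with
  | nil => rfl
  | cons c cs ih =>
      rw [bv_cons]
      have hc : c = '0' := h c (by simp)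
      have : (if c = '1' then 1 else 0) = 0 := by subst hc; decide
      rw [this, ih (fun x hx => h x (by simp [hx]))]
      simp

-- hexNatGo does not depend on the fuel once it is ≥ n
lemma hexNatGo_congr (n : Nat) : ∀ k k' : Nat, n ≤ k → n ≤ k' → hexNatGo k n = hexNatGo k' n := by
  induction n using Nat.strong_induction_on with
  | _ n ih =>
    intro k k' hk hk'
    by_cases h16 : n < 16
    · cases k with
      | zero =>
          cases k' with
          | zero => rfl
          | succ k' =>
              show [hexDigit (n % 16)] = _
              rw [hexNatGo, if_pos h16, Nat.mod_eq_of_lt h16]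
      | succ k =>
          cases k' with
          | zero =>
              show _ = [hexDigit (n % 16)]
              rw [hexNatGo, if_pos h16, Nat.mod_eq_of_lt h16]
          | succ k' => rw [hexNatGo, hexNatGo, if_pos h16, if_pos h16]
    · have hn16 : 16 ≤ n := by omega
      cases k with
      | zero => omega
      | succ k =>
          cases k' with
          | zero => omega
          | succ k' =>
              rw [hexNatGo, hexNatGo, if_neg h16, if_neg h16]
              have hd : n / 16 < n := Nat.div_lt_self (by omega) (by omega)
              rw [ih (n / 16) hd k k' (by omega) (by omega)]

lemma hexNat_lt (n : Nat) (h : n < 16) : hexNat n = [hexDigit n] := by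
  unfold hexNat
  cases n with
  | zero => show [hexDigit (0 % 16)] = _; norm_num
  | succ m => rw [hexNatGo, if_pos h]

lemma hexNat_ge (n : Nat) (h : 16 ≤ n) : hexNat n = hexNat (n / 16) ++ [hexDigit (n % 16)] := by
  unfold hexNat
  cases n with
  | zero => omega
  | succ m =>
      rw [hexNatGo, if_neg (by omega)]
      congr 1
      exact hexNatGo_congr ((m + 1) / 16) m ((m+1)/16) (by omega) (le_refl _)

lemma hexNat_len_pos (n : Nat) : 1 ≤ (hexNat n).length := by
  by_cases h : n < 16
  · rw [hexNat_lt n h]; simp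
  · rw [hexNat_ge n (by omega)]; simp

-- msb-first k hex digits of n (n < 16^k)
def digs : Nat → Nat → List Char
  | 0, _ => []
  | k + 1, n => digs k (n / 16) ++ [hexDigit (n % 16)]

lemma digs_pad : ∀ k n, 1 ≤ k → n < 16 ^ k →
    List.replicate (k - (hexNat n).length) '0' ++ hexNat n = digs k n := by
  intro k
  induction k with
  | zero => omega
  | succ k ih =>
      intro n _ hn
      by_cases hk : k = 0
      · subst hk
        have h16 : n < 16 := by omega
        rw [hexNat_lt n h16]
        simp [digs, Nat.mod_eq_of_lt h16]
      · have hk1 : 1 ≤ k := by omega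
        have hdiv : n / 16 < 16 ^ k := Nat.div_lt_of_lt_mul (by rw [pow_succ, mul_comm] at hn; exact hn)
        by_cases h16 : n < 16
        · rw [hexNat_lt n h16]
          have : n / 16 = 0 := Nat.div_eq_of_lt h16
          rw [digs, this, ← ih 0 hk1 (by positivity)]
          rw [hexNat_lt 0 (by omega)]
          have : hexDigit 0 = '0' := by decide
          simp only [List.length_cons, List.length_nil]
          rw [this, Nat.mod_eq_of_lt h16]
          have hrep : List.replicate (k - 1 + 1) '0' = List.replicate (k - 1) '0' ++ ['0'] :=
            List.replicate_succ' ..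
          have hk' : k + 1 - 1 = (k - 1) + 1 := by omega
          rw [hk', hrep]
        · rw [hexNat_ge n (by omega)]
          rw [digs, ← ih (n / 16) hk1 hdiv]
          simp only [List.length_append, List.length_cons, List.length_nil]
          have hlen : (hexNat (n / 16)).length ≥ 1 := hexNat_len_pos _
          have : k + 1 - ((hexNat (n / 16)).length + 1) = k - (hexNat (n / 16)).length := by omega
          rw [this]
          simp [List.append_assoc]

-- int(g, 2) on a 4-character pure-binary group
lemma ofCharsBase_group (g : List Char) (hlen : g.length = 4) (hbin : binOK g) :
    PySem.Int.ofCharsBase? g 2 = some (bv g : Int) := by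
  match g, hlen with
  | [a, b, c, d], _ =>
    have ha := hbin a (by simp)
    have hb := hbin b (by simp)
    have hc := hbin c (by simp)
    have hd := hbin d (by simp)
    rcases ha with rfl | rfl <;> rcases hb with rfl | rfl <;>
      rcases hc with rfl | rfl <;> rcases hd with rfl | rfl <;> decide

-- int(·, 2) ignores a trailing block of whitespace characters (the input starting with a non-space)
lemma ofCharsBase_strip_ws (a : Char) (g ws : List Char)
    (hna : PySem.Int.isIntSpace a = false)
    (hws : ∀ c ∈ ws, PySem.Int.isIntSpace c = true) :
    PySem.Int.ofCharsBase? ((a :: g) ++ ws) 2 = PySem.Int.ofCharsBase? (a :: g) 2 := by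
  unfold PySem.Int.ofCharsBase?
  rw [show ((a :: g) ++ ws) = a :: (g ++ ws) from rfl]
  rw [List.dropWhile_cons_of_neg (by simp [hna]), List.dropWhile_cons_of_neg (by simp [hna])]
  rw [show (a :: (g ++ ws)).reverse = ws.reverse ++ (a :: g).reverse by simp]
  rw [List.dropWhile_append_of_pos (by simpa using hws)]

-- int(g, 2) on a 1..4-character pure-binary group
lemma ofCharsBase_bin (g : List Char) (h1 : 1 ≤ g.length) (h4 : g.length ≤ 4) (hbin : binOK g) :
    PySem.Int.ofCharsBase? g 2 = some (bv g : Int) := by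
  rcases g with _ | ⟨a, g⟩
  · simp at h1
  rcases g with _ | ⟨b, g⟩
  · have ha := hbin a (by simp)
    rcases ha with rfl | rfl <;> decide
  rcases g with _ | ⟨c, g⟩
  · have ha := hbin a (by simp); have hb := hbin b (by simp)
    rcases ha with rfl | rfl <;> rcases hb with rfl | rfl <;> decide
  rcases g with _ | ⟨d, g⟩
  · have ha := hbin a (by simp); have hb := hbin b (by simp); have hc := hbin c (by simp)
    rcases ha with rfl | rfl <;> rcases hb with rfl | rfl <;> rcases hc with rfl | rfl <;> decide
  rcases g with _ | ⟨e, g⟩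
  · have ha := hbin a (by simp); have hb := hbin b (by simp)
    have hc := hbin c (by simp); have hd := hbin d (by simp)
    rcases ha with rfl | rfl <;> rcases hb with rfl | rfl <;>
      rcases hc with rfl | rfl <;> rcases hd with rfl | rfl <;> decide
  · exfalso; simp at h4; omega

-- int(g ++ ws, 2): binary digits followed by trailing whitespace (the only whitespace
-- characters inside Dom_z_h) parse to the value of the digits
lemma ofCharsBase_group_ws (g ws : List Char) (hlen : (g ++ ws).length = 4) (hg : 1 ≤ g.length)
    (hbin : binOK g) (hws : ∀ c ∈ ws, c = ' ' ∨ c = '\t' ∨ c = '\n' ∨ c = '\r') :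
    PySem.Int.ofCharsBase? (g ++ ws) 2 = some (bv g : Int) := by
  simp only [List.length_append] at hlen
  rcases g with _ | ⟨a, g⟩
  · simp at hg
  have hna : PySem.Int.isIntSpace a = false := by
    rcases hbin a (by simp) with rfl | rfl <;> decide
  rw [ofCharsBase_strip_ws a g ws hna
    (fun c hc => by rcases hws c hc with rfl | rfl | rfl | rfl <;> decide)]
  exact ofCharsBase_bin (a :: g) hg (by simp only [List.length_cons] at hlen ⊢; omega) hbin

-- A's nibble loop, as a flatMap over the group index
lemma zfold_eq_flatMap (t : List Char) (k : Nat) :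
    (List.range k).foldl
      (fun acc i =>
        acc ++ hexNat ((PySem.Int.ofCharsBase? (PySem.List.slice t (some ((4 * i : Nat) : Int)) (some ((4 * (i + 1) : Nat) : Int))) 2).getD 0).toNat)
      []
    = (List.range k).flatMap
        (fun i => hexNat ((PySem.Int.ofCharsBase? (PySem.List.slice t (some ((4 * i : Nat) : Int)) (some ((4 * (i + 1) : Nat) : Int))) 2).getD 0).toNat) := by
  rw [PySem.List.foldl_append_eq_flatMap]
  simp

lemma slice_group (t : List Char) (i : Nat) :
    PySem.List.slice t (some ((4 * i : Nat) : Int)) (some ((4 * (i + 1) : Nat) : Int))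
      = (t.drop (4 * i)).take 4 := by
  rw [PySem.List.slice_natCast]
  congr 1
  omega

-- groups i < k only look at the first 4*k characters
lemma slice_group_take (t : List Char) (k i : Nat) (hi : i < k) :
    (t.drop (4 * i)).take 4 = ((t.take (4 * k)).drop (4 * i)).take 4 := by
  rw [List.drop_take, List.take_take]
  congr 1
  omega

lemma flatMap_groups_eq_digs : ∀ (k : Nat) (P : List Char), P.length = 4 * k → binOK P →
    (List.range k).flatMap
        (fun i => hexNat ((PySem.Int.ofCharsBase? (PySem.List.slice P (some ((4 * i : Nat) : Int)) (some ((4 * (i + 1) : Nat) : Int))) 2).getD 0).toNat)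
      = digs k (bv P) := by
  intro k
  induction k with
  | zero => intro P hP _; have : P = [] := List.eq_nil_of_length_eq_zero (by omega)
            subst this; simp [digs]
  | succ k ih =>
      intro P hP hbin
      set F := P.take (4 * k) with hF
      set L := P.drop (4 * k) with hL
      have hFL : F ++ L = P := List.take_append_drop _ _
      have hFlen : F.length = 4 * k := by
        rw [hF, List.length_take]; omega
      have hLlen : L.length = 4 := by
        rw [hL, List.length_drop]; omega
      have hbinF : binOK F := fun c hc => hbin c (by rw [← hFL]; exact List.mem_append_left _ hc)
      have hbinL : binOK L := fun c hc => hbin c (by rw [← hFL]; exact List.mem_append_right _ hc)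
      rw [List.range_succ, List.flatMap_append]
      have hstep : ∀ i < k,
          PySem.List.slice P (some ((4 * i : Nat) : Int)) (some ((4 * (i + 1) : Nat) : Int))
            = PySem.List.slice F (some ((4 * i : Nat) : Int)) (some ((4 * (i + 1) : Nat) : Int)) := by
        intro i hi
        rw [slice_group, slice_group, hF, ← slice_group_take _ _ _ hi]
      have hmain : (List.range k).flatMap
          (fun i => hexNat ((PySem.Int.ofCharsBase? (PySem.List.slice P (some ((4 * i : Nat) : Int)) (some ((4 * (i + 1) : Nat) : Int))) 2).getD 0).toNat)
          = digs k (bv F) := by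
        rw [← ih F hFlen hbinF]
        exact List.flatMap_congr (fun i hi => by rw [hstep i (List.mem_range.mp hi)])
      rw [hmain]
      have hlast : PySem.List.slice P (some ((4 * k : Nat) : Int)) (some ((4 * (k + 1) : Nat) : Int)) = L := by
        rw [slice_group, hL]
        have : L.length = 4 := hLlen
        rw [← hL]
        exact List.take_of_length_le (by omega)
      simp only [List.flatMap_cons, List.flatMap_nil, List.append_nil, hlast]
      rw [ofCharsBase_group L hLlen hbinL]
      have hLlt : bv L < 16 := by have := bv_lt L; rw [hLlen] at this; simpa using this
      have hbvP : bv P = bv F * 16 + bv L := by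
        rw [← hFL, bv_append, hLlen]; norm_num
      rw [digs]
      have hdiv : bv P / 16 = bv F := by rw [hbvP]; omega
      have hmod : bv P % 16 = bv L := by rw [hbvP]; omega
      rw [hdiv, hmod]
      simp [Option.getD, Int.toNat_natCast, hexNat_lt (bv L) hLlt]

-- the while-loop pads to (32 - len) leading zeros
lemma pad32go_eq : ∀ (fuel : Nat) (l : List Char), 32 - l.length ≤ fuel →
    pad32go fuel l = List.replicate (32 - l.length) '0' ++ l := by
  intro fuel
  induction fuel with
  | zero =>
      intro l h
      have : 32 - l.length = 0 := by omega
      rw [this]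
      rfl
  | succ fuel ih =>
      intro l h
      by_cases hlt : l.length < 32
      · rw [pad32go, if_pos hlt, ih ('0' :: l) (by simp; omega)]
        have h1 : 32 - l.length = (32 - ('0' :: l).length) + 1 := by simp; omega
        rw [h1, List.replicate_succ']
        simp
      · rw [pad32go, if_neg hlt]
        have : 32 - l.length = 0 := by omega
        simp [this]

lemma pad32_eq (l : List Char) : pad32 l = List.replicate (32 - l.length) '0' ++ l :=
  pad32go_eq 32 l (by omega)

-- B's Horner loop computes bv on a pure-binary string
lemma horner_eq_bv (bits : List Char) (hbin : binOK bits) : ∀ a : Int,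
    bits.foldl (fun n b => 2 * n + (PySem.Int.ofChars? [b]).getD 0) a
      = a * 2 ^ bits.length + (bv bits : Int) := by
  induction bits with
  | nil => intro a; simp [bv]
  | cons c cs ih =>
      intro a
      have hc := hbin c (by simp)
      have hcs : binOK cs := fun x hx => hbin x (by simp [hx])
      have hdig : (PySem.Int.ofChars? [c]).getD 0 = (if c = '1' then 1 else 0 : Int) := by
        rcases hc with rfl | rfl <;> decide
      simp only [List.foldl_cons, hdig, ih hcs, bv_cons, List.length_cons]
      push_cast
      ring

-- a whitespace character (in the sense of str.rstrip) inside the input domain is one of the four ASCII ones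
lemma char_of_toNat (c : Char) (n : Char) (h : c.toNat = n.toNat) : c = n :=
  Char.ext (UInt32.toNat_inj.mp h)

lemma ws_char_cases (c : Char) (h : PySem.Chars.isspace c = true) (h2 : pvDomChar c = true) :
    c = ' ' ∨ c = '\t' ∨ c = '\n' ∨ c = '\r' := by
  simp only [PySem.Chars.isspace, pvDomChar, Bool.or_eq_true, Bool.and_eq_true, decide_eq_true_eq,
    beq_iff_eq] at h h2
  have : c.toNat = 32 ∨ c.toNat = 9 ∨ c.toNat = 10 ∨ c.toNat = 13 := by omega
  rcases this with h | h | h | h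
  · exact Or.inl (char_of_toNat c ' ' h)
  · exact Or.inr (Or.inl (char_of_toNat c '\t' h))
  · exact Or.inr (Or.inr (Or.inl (char_of_toNat c '\n' h)))
  · exact Or.inr (Or.inr (Or.inr (char_of_toNat c '\r' h)))

-- rstrip splits a list into its kept part and the stripped whitespace suffix
lemma rstrip_split (t : List Char) :
    t = PySem.Chars.rstrip t ++ (t.reverse.takeWhile PySem.Chars.isspace).reverse ∧
    (∀ c ∈ (t.reverse.takeWhile PySem.Chars.isspace).reverse, PySem.Chars.isspace c = true) := by
  constructor
  · conv_lhs => rw [← List.reverse_reverse t, ← List.takeWhile_append_dropWhile (p := PySem.Chars.isspace) (l := t.reverse)]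
    rw [List.reverse_append]
    rfl
  · intro c hc
    rw [List.mem_reverse] at hc
    exact List.mem_takeWhile_imp hc

-- everything both verdict theorems need: A's value and B's value in closed form
lemma bv_pos_of_mem (cs : List Char) (h : '1' ∈ cs) : 0 < bv cs := by
  induction cs with
  | nil => simp at h
  | cons c cs ih =>
      rw [bv_cons]
      have hp : 1 ≤ (2:Nat) ^ cs.length := Nat.one_le_two_pow
      rcases List.mem_cons.mp h with heq | h'
      · rw [if_pos heq.symm]
        omega
      · have h2 := ih h'
        split_ifs <;> omega

lemma bv_eq_zero_iff (cs : List Char) (hbin : binOK cs) : bv cs = 0 ↔ '1' ∉ cs :=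
  ⟨fun h h1 => by have := bv_pos_of_mem cs h1; omega,
   fun h => bv_zeros cs (fun c hc => (hbin c hc).resolve_right (fun e => h (e ▸ hc)))⟩

lemma hexDigit_fin_inj : ∀ a b : Fin 16, hexDigit a.val = hexDigit b.val → a = b := by decide

lemma hexDigit_inj (x y : Nat) (hx : x < 16) (hy : y < 16) (h : hexDigit x = hexDigit y) : x = y := by
  have := hexDigit_fin_inj ⟨x, hx⟩ ⟨y, hy⟩ h
  simpa using congrArg Fin.val this

lemma digs_length : ∀ k n, (digs k n).length = k := by
  intro k
  induction k with
  | zero => intro n; rfl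
  | succ k ih => intro n; simp [digs, ih]

lemma digs_inj : ∀ k a b, a < 16 ^ k → b < 16 ^ k → digs k a = digs k b → a = b := by
  intro k
  induction k with
  | zero => intro a b ha hb _; simp at ha hb; omega
  | succ k ih =>
      intro a b ha hb h
      simp only [digs] at h
      obtain ⟨h1, h2⟩ := List.append_inj h (by rw [digs_length, digs_length])
      have hd : a % 16 = b % 16 :=
        hexDigit_inj _ _ (Nat.mod_lt _ (by omega)) (Nat.mod_lt _ (by omega)) (by simpa using h2)
      have hdiv : a / 16 = b / 16 :=
        ih (a / 16) (b / 16)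
          (Nat.div_lt_of_lt_mul (by rw [pow_succ, mul_comm] at ha; exact ha))
          (Nat.div_lt_of_lt_mul (by rw [pow_succ, mul_comm] at hb; exact hb)) h1
      omega

-- format(n,'08x') is exactly the 8 msb-first hex digits when n < 16^8
lemma fmt08x_eq_digs (n : Nat) (h : n < 16 ^ 8) : fmt08x ((n : Nat) : Int) = digs 8 n := by
  unfold fmt08x
  dsimp only
  rw [Int.toNat_natCast]
  exact digs_pad 8 n (by omega) h

lemma argA_bound (v1 v2 : Nat) (h1 : v1 < 2 ^ 28) (h2 : v2 < 16) : v1 * 16 + v2 < 16 ^ 8 := by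
  have e1 : (16:Nat) ^ 8 = 4294967296 := by norm_num
  have e2 : (2:Nat) ^ 28 = 268435456 := by norm_num
  omega

lemma argB_bound (v1 v2 W : Nat) (h1 : v1 < 2 ^ 28) (h2 : v2 < 16) :
    v1 * 2 ^ (4 - W) + v2 < 16 ^ 8 := by
  have hexp : (2:Nat) ^ (4 - W) ≤ 16 := by
    calc (2:Nat) ^ (4 - W) ≤ 2 ^ 4 := Nat.pow_le_pow_right (by omega) (by omega)
      _ = 16 := by norm_num
  have hmul : v1 * 2 ^ (4 - W) ≤ v1 * 16 := Nat.mul_le_mul_left v1 hexp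
  have e1 : (16:Nat) ^ 8 = 4294967296 := by norm_num
  have e2 : (2:Nat) ^ 28 = 268435456 := by norm_num
  omega

-- both programs in closed form: A shows digs 8 (v1*16 + v2); B formats v1*2^(4-w) + v2,
-- where v1 is the value of the first 28 padded characters, v2 the value of the last
-- group's digits, and w the number of stripped trailing whitespace characters
lemma z_h_key (text : String) (hdom : Dom_z_h text) (hpre : Pre_z_h text) :
    ∃ v1 v2 : Nat,
      z_h text = String.ofList (digs 8 (v1 * 16 + v2)) ∧
      z_h_alt text = String.ofList (fmt08x ((v1 * 2 ^ (4 - ((text.toList.take 32).length - (PySem.Chars.rstrip (text.toList.take 32)).length)) + v2 : Nat) : Int)) ∧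
      v2 < 16 ∧ v1 < 2 ^ 28 ∧
      (v1 = 0 ↔ '1' ∉ (PySem.Chars.rstrip (text.toList.take 32)).take
        ((PySem.Chars.rstrip (text.toList.take 32)).length -
          (4 - ((text.toList.take 32).length - (PySem.Chars.rstrip (text.toList.take 32)).length)))) := by
  obtain ⟨hpre1, hpre2⟩ := hpre
  set l := text.toList with hl
  set t := l.take 32 with ht
  set s := PySem.Chars.rstrip t with hs
  set ws := (t.reverse.takeWhile PySem.Chars.isspace).reverse with hws
  obtain ⟨htsplit, hwssp⟩ := rstrip_split t
  rw [← hs, ← hws] at htsplit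
  rw [← hws] at hwssp
  have hsbin : binOK s := by
    intro c hc
    have := List.all_eq_true.mp hpre1 c hc
    simpa using this
  have hwsdom : ∀ c ∈ ws, c = ' ' ∨ c = '\t' ∨ c = '\n' ∨ c = '\r' := by
    intro c hc
    have hct : c ∈ t := by rw [htsplit]; exact List.mem_append_right _ hc
    have hcl : c ∈ l := List.mem_of_mem_take hct
    have hdomc : pvDomChar c = true := by
      have := List.all_eq_true.mp hdom c (by rw [← hl]; exact hcl)
      simpa using this
    exact ws_char_cases c (hwssp c hc) hdomc
  -- lengths
  have htlen : t.length ≤ 32 := by rw [ht]; simp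
  have hwslen : ws.length = t.length - s.length := by
    have := congrArg List.length htsplit
    simp at this
    omega
  have hw3 : ws.length ≤ 3 := by rw [hwslen]; exact hpre2
  -- the 32-character string A's groups read
  set Q : List Char := List.replicate (32 - l.length) '0' ++ s with hQ
  set P : List Char := (List.replicate (32 - l.length) '0' ++ l).take 32 with hP
  have hslen : s.length + ws.length = t.length := by
    have := congrArg List.length htsplit
    simp at this
    omega
  have hPQ : P = Q ++ ws := by
    by_cases hc : l.length ≤ 32
    · have htl : t = l := by rw [ht]; exact List.take_of_length_le hc
      have hlsw : l = s ++ ws := by rw [← htl]; exact htsplit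
      rw [hP, List.take_of_length_le (by simp; omega), hQ, hlsw, List.append_assoc]
    · have h0 : 32 - l.length = 0 := by omega
      rw [hP, hQ, h0]
      simp only [List.replicate_zero, List.nil_append]
      rw [← ht, htsplit]
  have hQlen : Q.length = 32 - ws.length := by
    rw [hQ]
    simp only [List.length_append, List.length_replicate]
    by_cases hc : l.length ≤ 32
    · have : t.length = l.length := by rw [ht]; simp; omega
      omega
    · have : t.length = 32 := by rw [ht]; simp; omega
      omega
  have hQ29 : 28 ≤ Q.length := by omega
  have hPlen : P.length = 32 := by
    rw [hPQ]
    simp only [List.length_append]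
    omega
  have hbinQ : binOK Q := by
    intro c hc
    rw [hQ] at hc
    rcases List.mem_append.mp hc with h | h
    · exact Or.inl (List.eq_of_mem_replicate h)
    · exact hsbin c h
  -- the head (7 full groups) and the last group of Q
  set gb := Q.drop 28 with hgb
  have hgblen : gb.length = 4 - ws.length := by rw [hgb, List.length_drop]; omega
  have hgbbin : binOK gb := fun c hc => hbinQ c (List.mem_of_mem_drop hc)
  have hP28 : P.take 28 = Q.take 28 := by
    rw [hPQ, List.take_append]
    have : 28 - Q.length = 0 := by omega
    rw [this]
    simp
  have hPdrop : P.drop 28 = gb ++ ws := by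
    rw [hPQ, List.drop_append, hgb]
    have : 28 - Q.length = 0 := by omega
    rw [this]
    simp
  have hbinP28 : binOK (P.take 28) := by
    rw [hP28]
    exact fun c hc => hbinQ c (List.mem_of_mem_take hc)
  -- A's side
  have htrunc : ∀ i, i < 8 →
      PySem.List.slice (List.replicate (32 - l.length) '0' ++ l) (some ((4 * i : Nat) : Int)) (some ((4 * (i + 1) : Nat) : Int))
        = PySem.List.slice P (some ((4 * i : Nat) : Int)) (some ((4 * (i + 1) : Nat) : Int)) := by
    intro i hi
    rw [slice_group, slice_group, hP]
    exact slice_group_take _ 8 i hi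
  have hsplit8 : (List.range 8) = (List.range 7) ++ [7] := by decide
  have hA1 : (List.range 8).flatMap
      (fun i => hexNat ((PySem.Int.ofCharsBase? (PySem.List.slice (List.replicate (32 - l.length) '0' ++ l) (some ((4 * i : Nat) : Int)) (some ((4 * (i + 1) : Nat) : Int))) 2).getD 0).toNat)
      = (List.range 8).flatMap
      (fun i => hexNat ((PySem.Int.ofCharsBase? (PySem.List.slice P (some ((4 * i : Nat) : Int)) (some ((4 * (i + 1) : Nat) : Int))) 2).getD 0).toNat) := by
    exact List.flatMap_congr (fun i hi => by rw [htrunc i (List.mem_range.mp hi)])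
  -- first seven groups
  have hfront : ∀ i, i < 7 →
      PySem.List.slice P (some ((4 * i : Nat) : Int)) (some ((4 * (i + 1) : Nat) : Int))
        = PySem.List.slice (P.take 28) (some ((4 * i : Nat) : Int)) (some ((4 * (i + 1) : Nat) : Int)) := by
    intro i hi
    rw [slice_group, slice_group]
    exact slice_group_take _ 7 i hi
  have hA2 : (List.range 7).flatMap
      (fun i => hexNat ((PySem.Int.ofCharsBase? (PySem.List.slice P (some ((4 * i : Nat) : Int)) (some ((4 * (i + 1) : Nat) : Int))) 2).getD 0).toNat)
      = digs 7 (bv (P.take 28)) := by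
    rw [← flatMap_groups_eq_digs 7 (P.take 28) (by rw [List.length_take]; omega) hbinP28]
    exact List.flatMap_congr (fun i hi => by rw [hfront i (List.mem_range.mp hi)])
  -- the last group
  have hlastslice : PySem.List.slice P (some ((4 * 7 : Nat) : Int)) (some ((4 * (7 + 1) : Nat) : Int)) = gb ++ ws := by
    rw [slice_group]
    show (P.drop 28).take 4 = gb ++ ws
    rw [hPdrop]
    refine List.take_of_length_le ?_
    simp only [List.length_append]
    omega
  have hgb1 : 1 ≤ gb.length := by omega
  have hlastparse : PySem.Int.ofCharsBase? (gb ++ ws) 2 = some (bv gb : Int) :=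
    ofCharsBase_group_ws gb ws (by simp only [List.length_append]; omega) hgb1 hgbbin hwsdom
  have hgbval : bv gb < 16 := by
    have := bv_lt gb
    calc bv gb < 2 ^ gb.length := this
      _ ≤ 2 ^ 4 := Nat.pow_le_pow_right (by omega) (by omega)
      _ = 16 := by norm_num
  have hA3 : ([7] : List Nat).flatMap
      (fun i => hexNat ((PySem.Int.ofCharsBase? (PySem.List.slice P (some ((4 * i : Nat) : Int)) (some ((4 * (i + 1) : Nat) : Int))) 2).getD 0).toNat)
      = [hexDigit (bv gb)] := by
    simp only [List.flatMap_cons, List.flatMap_nil, List.append_nil]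
    rw [hlastslice, hlastparse]
    simp [Option.getD, Int.toNat_natCast, hexNat_lt (bv gb) hgbval]
  -- A's value
  have hAval : digs 7 (bv (Q.take 28)) ++ [hexDigit (bv gb)] = digs 8 (bv (Q.take 28) * 16 + bv gb) := by
    have h1 : (bv (Q.take 28) * 16 + bv gb) / 16 = bv (Q.take 28) := by omega
    have h2 : (bv (Q.take 28) * 16 + bv gb) % 16 = bv gb := by omega
    show _ = digs (7 + 1) _
    conv_rhs => rw [digs]
    rw [h1, h2]
  have hAeq : z_h text = String.ofList (digs 8 (bv (Q.take 28) * 16 + bv gb)) := by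
    unfold z_h
    dsimp only
    rw [← hl, pad32_eq l, zfold_eq_flatMap, hA1, hsplit8, List.flatMap_append, hA2, hA3, hP28,
      hAval]
  -- B's value
  have hsliceB : PySem.List.slice l none (some (32 : Int)) = t := by
    rw [PySem.List.slice_to l (show (0:Int) ≤ 32 by norm_num)]
    rfl
  have hBeq : z_h_alt text = String.ofList (fmt08x ((bv s : Nat) : Int)) := by
    unfold z_h_alt
    dsimp only
    rw [← hl, hsliceB, ← hs, horner_eq_bv s hsbin 0]
    norm_num
  -- the two values decomposed over the same digits
  have hbvQ : bv Q = bv s := by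
    rw [hQ, bv_append, bv_zeros _ (fun c hc => List.eq_of_mem_replicate hc)]
    simp
  have hQsplit : Q.take 28 ++ gb = Q := by rw [hgb]; exact List.take_append_drop _ _
  have hbvsplit : bv s = bv (Q.take 28) * 2 ^ gb.length + bv gb := by
    rw [← hbvQ, ← hQsplit, bv_append, hQsplit]
  have hbvs : bv s = bv (Q.take 28) * 2 ^ (4 - (t.length - s.length)) + bv gb := by
    rw [hbvsplit, hgblen, hwslen]
  have htmin : t.length = min 32 l.length := by rw [ht]; simp
  have hbinQ28 : binOK (Q.take 28) := fun c hc => hbinQ c (List.mem_of_mem_take hc)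
  have hidx2 : s.length - (4 - (t.length - s.length)) = 28 - (32 - l.length) := by omega
  have hmem : ('1' ∈ Q.take 28) ↔ ('1' ∈ s.take (s.length - (4 - (t.length - s.length)))) := by
    rw [hidx2, hQ, List.take_append]
    simp [List.take_replicate, List.mem_replicate]
  refine ⟨bv (Q.take 28), bv gb, hAeq, ?_, hgbval, ?_, ?_⟩
  · rw [hBeq, hbvs]
  · have h28 : (Q.take 28).length = 28 := by rw [List.length_take]; omega
    have := bv_lt (Q.take 28)
    rw [h28] at this
    exact this
  · exact (bv_eq_zero_iff _ hbinQ28).trans (not_congr hmem)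

-- ===== VERDICT (by name: the statement is the Claim_ definition above) =====
theorem z_h_spec : Claim_unchanged_z_h := by
  intro text hdom hpre
  unfold Spec_z_h
  intro hnd
  obtain ⟨v1, v2, hA, hB, hv2, hv1, hiff⟩ := z_h_key text hdom hpre
  unfold D_z_h at hnd
  push Not at hnd
  rw [hA, hB]
  by_cases hw : 1 ≤ (text.toList.take 32).length - (PySem.Chars.rstrip (text.toList.take 32)).length
  · have h0 : v1 = 0 := hiff.mpr (hnd hw)
    rw [h0, fmt08x_eq_digs _ (argB_bound 0 v2 _ (by positivity) hv2)]
    norm_num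
  · have hw0 : (text.toList.take 32).length - (PySem.Chars.rstrip (text.toList.take 32)).length = 0 := by omega
    rw [hw0]
    have he : (2:Nat) ^ (4 - 0) = 16 := by norm_num
    rw [he, fmt08x_eq_digs _ (argA_bound v1 v2 hv1 hv2)]

theorem z_h_changed : Claim_changed_z_h := by unfold Claim_changed_z_h; decide

theorem z_h_tight : Claim_exact_z_h := by
  intro text hdom hpre hD
  obtain ⟨v1, v2, hA, hB, hv2, hv1, hiff⟩ := z_h_key text hdom hpre
  obtain ⟨hpre1, hpre2⟩ := hpre
  unfold D_z_h at hD
  obtain ⟨hw1, hmem1⟩ := hD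
  have hv1pos : 0 < v1 := by
    rcases Nat.eq_zero_or_pos v1 with h0 | h
    · exact absurd hmem1 (hiff.mp h0)
    · exact h
  rw [hA, hB, fmt08x_eq_digs _ (argB_bound v1 v2 _ hv1 hv2)]
  intro heq
  have hval := digs_inj 8 _ _ (argA_bound v1 v2 hv1 hv2) (argB_bound v1 v2 _ hv1 hv2)
    (String.ofList_inj.mp heq)
  have hexp : (2:Nat) ^ (4 - ((text.toList.take 32).length - (PySem.Chars.rstrip (text.toList.take 32)).length)) ≤ 8 := by
    calc (2:Nat) ^ (4 - ((text.toList.take 32).length - (PySem.Chars.rstrip (text.toList.take 32)).length)) ≤ 2 ^ 3 :=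
          Nat.pow_le_pow_right (by omega) (by omega)
      _ = 8 := by norm_num
  have hmul : v1 * 2 ^ (4 - ((text.toList.take 32).length - (PySem.Chars.rstrip (text.toList.take 32)).length)) ≤ v1 * 8 :=
    Nat.mul_le_mul_left v1 hexp
  omega
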